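-- pv_equiv track=rewrite | github.com/JiniousChoi/encyclopedia-in-code | jpylib/jtrees/expr_tree_with_paren.py | find_paren_idx
-- ===== SOURCE A (Python) =====
-- def find_paren_idx(expression):
--     open_paren_cnt = 0
--     result = []
--     for i,c in enumerate(expression):
--         if c == '(':
--             open_paren_cnt += 1
--             result.append(i)
--         elif c == ')':
--             open_paren_cnt -= 1
--             if open_paren_cnt == 0:
--                 result.append(i)
--                 return result #[x,y]
--     #not reachable
--     if open_paren_cnt != 0:
--         assert False, "not paired parentheses"
--
--     assert False
-- ===== SOURCE B (Python) =====
-- def find_paren_idx(expression):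
--     # pass 1: locate j = first ')' where the running balance returns to 0
--     bal = 0
--     j = None
--     for i, c in enumerate(expression):
--         if c == '(':
--             bal += 1
--         elif c == ')':
--             bal -= 1
--             if bal == 0:
--                 j = i
--                 break
--     if j is None:
--         assert bal == 0, "not paired parentheses"
--         assert False
--     # pass 2: gather all '(' indices before j, then the closing index
--     return [i for i, c in enumerate(expression) if c == '(' and i < j] + [j]
-- ===== Notes on version B (the rewrite author's own statement) =====
-- stated objective: alternative
-- what changed: A accumulates the result while scanning for the terminating close in one interleaved loop; B first locates the boundary index j with a plain balance scan and then gathers the open-paren indices before j with a comprehension (locate-then-gather, two passes).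
import Mathlib
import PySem

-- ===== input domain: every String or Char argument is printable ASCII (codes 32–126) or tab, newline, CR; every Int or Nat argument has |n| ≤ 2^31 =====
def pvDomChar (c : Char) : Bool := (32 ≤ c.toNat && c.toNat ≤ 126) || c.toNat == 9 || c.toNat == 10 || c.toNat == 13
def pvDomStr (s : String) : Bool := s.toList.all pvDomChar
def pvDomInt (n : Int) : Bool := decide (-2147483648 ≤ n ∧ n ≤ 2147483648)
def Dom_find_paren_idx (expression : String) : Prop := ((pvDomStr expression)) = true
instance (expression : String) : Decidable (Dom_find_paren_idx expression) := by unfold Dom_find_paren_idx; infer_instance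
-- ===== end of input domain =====

-- B replaces A's interleaved accumulate-while-detecting loop by a locate-boundary-then-gather
-- two-pass decomposition (same O(n) cost, different structure).


-- ===== PORT A =====
-- A's loop; `none` = the fall-through where Python A raises AssertionError (excluded by Pre_).
def pvLoopA : List Char → Int → Int → List Int → Option (List Int)
  | [], _, _, _ => none
  | c :: cs, cnt, i, res =>
    if c = '(' then pvLoopA cs (cnt + 1) (i + 1) (res ++ [i])
    else if c = ')' then
      if cnt - 1 = 0 then some (res ++ [i]) else pvLoopA cs (cnt - 1) (i + 1) res
    else pvLoopA cs cnt (i + 1) res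

def find_paren_idx (expression : String) : List Int :=
  (pvLoopA expression.toList 0 0 []).getD []

-- ===== PORT B =====
-- B's first pass: the index of the first ')' at which the balance returns to 0 (none = B raises).
def pvFindJ : List Char → Int → Int → Option Int
  | [], _, _ => none
  | c :: cs, bal, i =>
    if c = '(' then pvFindJ cs (bal + 1) (i + 1)
    else if c = ')' then
      if bal - 1 = 0 then some i else pvFindJ cs (bal - 1) (i + 1)
    else pvFindJ cs bal (i + 1)

def find_paren_idx_alt (expression : String) : List Int :=
  match pvFindJ expression.toList 0 0 with
  | none => []  -- Python B raises AssertionError here (outside Pre_)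
  | some j =>
    ((PySem.List.enumerate expression.toList).filter
        (fun p => p.2 == '(' && decide (p.1 < j))).map (fun p => p.1) ++ [j]

-- ===== PRECONDITION & SPEC =====
-- Pre_ excludes exactly the inputs where Python A raises AssertionError (no ')' at which the
-- running paren balance returns to 0); Python B raises there too.
def Pre_find_paren_idx (expression : String) : Prop :=
  ∃ k : Fin expression.toList.length,
    expression.toList.get k = ')' ∧
    (expression.toList.take k).count '(' = (expression.toList.take (k + 1)).count ')'
instance (expression : String) : Decidable (Pre_find_paren_idx expression) := by
  unfold Pre_find_paren_idx; infer_instance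

def pvWitness_find_paren_idx : String := "(a)"

def Spec_find_paren_idx (expression : String) (out : List Int) : Prop := out = find_paren_idx_alt expression
instance (expression : String) (out : List Int) : Decidable (Spec_find_paren_idx expression out) := by unfold Spec_find_paren_idx; infer_instance

-- ===== CLAIM (what is proved, stated in full; the proofs are below) =====
def Claim_equal_find_paren_idx : Prop := ∀ (expression : String), Dom_find_paren_idx expression → Pre_find_paren_idx expression → Spec_find_paren_idx expression (find_paren_idx expression)

-- ===== LEMMAS AND PROOFS =====

-- proof helper: the '(' indices in cs at offset i that are < j, in order
def pvOpens : List Char → Int → Int → List Int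
  | [], _, _ => []
  | c :: cs, i, j =>
    if c = '(' ∧ i < j then i :: pvOpens cs (i + 1) j else pvOpens cs (i + 1) j

theorem pvOpens_of_le (cs : List Char) (i j : Int) (h : j ≤ i) : pvOpens cs i j = [] := by
  induction cs generalizing i with
  | nil => rfl
  | cons c cs ih =>
    simp only [pvOpens]
    rw [if_neg (by omega), ih (i + 1) (by omega)]

theorem pvFindJ_ge (cs : List Char) (bal i j : Int) (h : pvFindJ cs bal i = some j) : i ≤ j := by
  induction cs generalizing bal i with
  | nil => simp [pvFindJ] at h
  | cons c cs ih =>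
    simp only [pvFindJ] at h
    split_ifs at h with h1 h2 h3
    · have := ih (bal + 1) (i + 1) h; omega
    · simp only [Option.some.injEq] at h; omega
    · have := ih (bal - 1) (i + 1) h; omega
    · have := ih bal (i + 1) h; omega

-- main invariant: A's loop equals B's boundary scan plus the gathered opens
theorem pvLoopA_eq (cs : List Char) (cnt i : Int) (res : List Int) :
    pvLoopA cs cnt i res = (pvFindJ cs cnt i).map (fun j => res ++ pvOpens cs i j ++ [j]) := by
  induction cs generalizing cnt i res with
  | nil => rfl
  | cons c cs ih =>
    simp only [pvLoopA, pvFindJ]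
    split_ifs with h1 h2 h3
    · rw [ih]
      cases hj : pvFindJ cs (cnt + 1) (i + 1) with
      | none => rfl
      | some j =>
        have hij : i < j := by have := pvFindJ_ge cs (cnt + 1) (i + 1) j hj; omega
        simp [pvOpens, h1, hij]
    · simp [pvOpens, h1, pvOpens_of_le cs (i + 1) i (by omega)]
    · rw [ih]
      cases hj : pvFindJ cs (cnt - 1) (i + 1) with
      | none => rfl
      | some j => simp [pvOpens, h2]
    · rw [ih]
      cases hj : pvFindJ cs cnt (i + 1) with
      | none => rfl
      | some j => simp [pvOpens, h1]

-- bridge: B's comprehension over enumerate computes pvOpens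
theorem pvEnum_filter_eq (cs : List Char) (s j : Int) :
    ((PySem.List.enumerate cs s).filter (fun p => p.2 == '(' && decide (p.1 < j))).map
        (fun p => p.1) = pvOpens cs s j := by
  induction cs generalizing s with
  | nil => rfl
  | cons c cs ih =>
    rw [PySem.List.enumerate_cons]
    simp only [List.filter_cons, pvOpens]
    by_cases h : c = '(' ∧ s < j
    · rw [if_pos (by simp [h.1, h.2]), if_pos h]
      simp [ih]
    · rw [if_neg (by simpa using fun hc hs => h ⟨hc, hs⟩), if_neg h, ih]

-- ===== VERDICT (by name: the statement is the Claim_ definition above) =====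
theorem find_paren_idx_spec : Claim_equal_find_paren_idx := by
  intro e _ _
  unfold Spec_find_paren_idx find_paren_idx find_paren_idx_alt
  rw [pvLoopA_eq]
  cases hj : pvFindJ e.toList 0 0 with
  | none => rfl
  | some j => simp [pvEnum_filter_eq]
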